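-- pv_equiv track=rewrite | github.com/tmsnky/TP-KB-21-1--Yaroslav-Tymoschenko | lab_02/lab2.py | findExtremumWithIndex
-- ===== SOURCE A (Python) =====
-- def findExtremumWithIndex(listForSearch: list, find_max: bool):
--     extremum = None
--     index = None
--
--     for idx, val in enumerate(listForSearch):
--         if extremum is None or (find_max and val > extremum) or (not find_max and val < extremum):
--             extremum = val
--             index = idx
--
--     return index, extremum
-- ===== SOURCE B (Python) =====
-- def findExtremumWithIndex(listForSearch: list, find_max: bool):
--     if not listForSearch:
--         return None, None
--     ext = max(listForSearch) if find_max else min(listForSearch)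
--     return listForSearch.index(ext), ext
-- ===== Notes on version B (the rewrite author's own statement) =====
-- stated objective: idiomatic
-- what changed: Replaces the fused tracking loop over enumerate with the library-call pair: compute the extremum with max()/min(), then locate its first occurrence with list.index().
import Mathlib
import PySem

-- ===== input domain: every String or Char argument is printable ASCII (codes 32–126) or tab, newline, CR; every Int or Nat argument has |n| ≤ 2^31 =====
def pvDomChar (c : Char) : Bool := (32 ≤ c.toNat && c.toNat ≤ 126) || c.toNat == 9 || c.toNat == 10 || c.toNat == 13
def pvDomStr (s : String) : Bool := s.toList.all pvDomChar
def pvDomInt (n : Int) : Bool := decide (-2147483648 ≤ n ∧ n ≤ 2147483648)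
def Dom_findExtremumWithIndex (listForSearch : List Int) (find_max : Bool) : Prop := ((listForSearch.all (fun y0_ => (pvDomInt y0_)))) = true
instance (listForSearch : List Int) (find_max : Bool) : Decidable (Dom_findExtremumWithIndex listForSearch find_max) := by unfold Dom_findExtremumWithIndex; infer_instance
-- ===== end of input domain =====

-- B computes the extremum with a max/min library call and then locates its first
-- occurrence with list.index, instead of A's fused tracking loop (idiomatic rewrite).

-- ===== PORT A =====
-- the loop body: state (extremum, index), one enumerate item p = (idx, val)
def pvStepA (find_max : Bool) (st : Option Int × Option Int) (p : Int × Int) : Option Int × Option Int :=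
  match st.1 with
  | none => (some p.2, some p.1)
  | some e => if (find_max && decide (p.2 > e)) || (!find_max && decide (p.2 < e))
              then (some p.2, some p.1) else st

def findExtremumWithIndex (listForSearch : List Int) (find_max : Bool) : Option Int × Option Int :=
  let st := (PySem.List.enumerate listForSearch 0).foldl (pvStepA find_max) (none, none)
  (st.2, st.1)

-- ===== PORT B =====
def findExtremumWithIndex_alt (listForSearch : List Int) (find_max : Bool) : Option Int × Option Int :=
  match (if find_max then PySem.List.max? listForSearch (fun y => y)
         else PySem.List.min? listForSearch (fun y => y)) with
  | none => (none, none)      -- empty list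
  | some ext => ((PySem.List.index? listForSearch ext).map (fun j => (j : Int)), some ext)

-- ===== PRECONDITION & SPEC =====
def Spec_findExtremumWithIndex (listForSearch : List Int) (find_max : Bool) (out : Option Int × Option Int) : Prop := out = findExtremumWithIndex_alt listForSearch find_max
instance (listForSearch : List Int) (find_max : Bool) (out : Option Int × Option Int) : Decidable (Spec_findExtremumWithIndex listForSearch find_max out) := by unfold Spec_findExtremumWithIndex; infer_instance

-- ===== CLAIM (what is proved, stated in full; the proofs are below) =====
def Claim_equal_findExtremumWithIndex : Prop := ∀ (listForSearch : List Int) (find_max : Bool), Dom_findExtremumWithIndex listForSearch find_max → Spec_findExtremumWithIndex listForSearch find_max (findExtremumWithIndex listForSearch find_max)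

-- ===== LEMMAS AND PROOFS =====

-- A's loop from a non-empty state: final extremum is the running max; the index is
-- unchanged if nothing beats e, else offset + first index of the running max in t
theorem pvLoopMax (t : List Int) : ∀ (e i k : Int),
    (PySem.List.enumerate t k).foldl (pvStepA true) (some e, some i)
      = (some (t.foldl max e),
         if t.foldl max e ≤ e then some i
         else (PySem.List.index? t (t.foldl max e)).map (fun j => k + (j : Int))) := by
  induction t with
  | nil => intro e i k; simp [PySem.List.enumerate_nil]
  | cons v t ih =>
    intro e i k
    rw [PySem.List.enumerate_cons, List.foldl_cons]
    by_cases h : e < v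
    · rw [show pvStepA true (some e, some i) (k, v) = (some v, some k) by simp [pvStepA, h],
          ih v k (k + 1), List.foldl_cons, max_eq_right h.le]
      have hvle : v ≤ t.foldl max v := (PySem.List.le_foldl_max t v).1
      by_cases hmv : t.foldl max v = v
      · rw [hmv]
        simp only [le_refl, if_pos]
        rw [if_neg (by omega), PySem.List.index?_cons_self]
        simp
      · have hmem : t.foldl max v ∈ t := (PySem.List.foldl_max_mem t v).resolve_left hmv
        obtain ⟨j, hj⟩ := Option.isSome_iff_exists.mp
          ((PySem.List.index?_isSome_iff t (t.foldl max v)).mpr hmem)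
        rw [PySem.List.index?_cons_of_ne t (fun hvv => hmv hvv.symm), hj,
            if_neg (by omega), if_neg (by omega)]
        simp
        omega
    · rw [show pvStepA true (some e, some i) (k, v) = (some e, some i) by
            simp [pvStepA]; omega,
          ih e i (k + 1), List.foldl_cons, max_eq_left (by omega)]
      by_cases hle : t.foldl max e ≤ e
      · simp [hle]
      · have hmem : t.foldl max e ∈ t := (PySem.List.foldl_max_mem t e).resolve_left (by omega)
        obtain ⟨j, hj⟩ := Option.isSome_iff_exists.mp
          ((PySem.List.index?_isSome_iff t (t.foldl max e)).mpr hmem)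
        rw [PySem.List.index?_cons_of_ne t (by omega : v ≠ t.foldl max e), hj,
            if_neg hle, if_neg hle]
        simp
        omega

theorem pvLoopMin (t : List Int) : ∀ (e i k : Int),
    (PySem.List.enumerate t k).foldl (pvStepA false) (some e, some i)
      = (some (t.foldl min e),
         if e ≤ t.foldl min e then some i
         else (PySem.List.index? t (t.foldl min e)).map (fun j => k + (j : Int))) := by
  induction t with
  | nil => intro e i k; simp [PySem.List.enumerate_nil]
  | cons v t ih =>
    intro e i k
    rw [PySem.List.enumerate_cons, List.foldl_cons]
    by_cases h : v < e
    · rw [show pvStepA false (some e, some i) (k, v) = (some v, some k) by simp [pvStepA, h],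
          ih v k (k + 1), List.foldl_cons, min_eq_right h.le]
      have hvle : t.foldl min v ≤ v := (PySem.List.foldl_min_le t v).1
      by_cases hmv : t.foldl min v = v
      · rw [hmv]
        simp only [le_refl, if_pos]
        rw [if_neg (by omega), PySem.List.index?_cons_self]
        simp
      · have hmem : t.foldl min v ∈ t := (PySem.List.foldl_min_mem t v).resolve_left hmv
        obtain ⟨j, hj⟩ := Option.isSome_iff_exists.mp
          ((PySem.List.index?_isSome_iff t (t.foldl min v)).mpr hmem)
        rw [PySem.List.index?_cons_of_ne t (fun hvv => hmv hvv.symm), hj,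
            if_neg (by omega), if_neg (by omega)]
        simp
        omega
    · rw [show pvStepA false (some e, some i) (k, v) = (some e, some i) by
            simp [pvStepA]; omega,
          ih e i (k + 1), List.foldl_cons, min_eq_left (by omega)]
      by_cases hle : e ≤ t.foldl min e
      · simp [hle]
      · have hmem : t.foldl min e ∈ t := (PySem.List.foldl_min_mem t e).resolve_left (by omega)
        obtain ⟨j, hj⟩ := Option.isSome_iff_exists.mp
          ((PySem.List.index?_isSome_iff t (t.foldl min e)).mpr hmem)
        rw [PySem.List.index?_cons_of_ne t (by omega : v ≠ t.foldl min e), hj,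
            if_neg hle, if_neg hle]
        simp
        omega

-- ===== VERDICT (by name: the statement is the Claim_ definition above) =====
theorem findExtremumWithIndex_spec : Claim_equal_findExtremumWithIndex := by
  intro xs fm _
  unfold Spec_findExtremumWithIndex findExtremumWithIndex findExtremumWithIndex_alt
  cases xs with
  | nil => cases fm <;> simp [PySem.List.enumerate_nil, PySem.List.max?, PySem.List.min?]
  | cons x t =>
    rw [PySem.List.enumerate_cons, List.foldl_cons,
        show pvStepA fm (none, none) ((0 : Int), x) = (some x, some 0) from rfl]
    cases fm
    · -- min
      show (((PySem.List.enumerate t (0 + 1)).foldl (pvStepA false) (some x, some 0)).2,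
            ((PySem.List.enumerate t (0 + 1)).foldl (pvStepA false) (some x, some 0)).1) = _
      rw [show ((0 : Int) + 1) = 1 from rfl, pvLoopMin t x 0 1]
      simp only [Bool.false_eq_true, if_false, PySem.List.min?_id_cons]
      have hx : t.foldl min x ≤ x := (PySem.List.foldl_min_le t x).1
      by_cases hle : x ≤ t.foldl min x
      · have hmx : t.foldl min x = x := le_antisymm hx hle
        rw [if_pos hle, hmx, PySem.List.index?_cons_self]
        simp
      · have hmem : t.foldl min x ∈ t := (PySem.List.foldl_min_mem t x).resolve_left (by omega)
        obtain ⟨j, hj⟩ := Option.isSome_iff_exists.mp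
          ((PySem.List.index?_isSome_iff t (t.foldl min x)).mpr hmem)
        rw [if_neg hle, PySem.List.index?_cons_of_ne t (by omega : x ≠ t.foldl min x), hj]
        simp
        omega
    · -- max
      show (((PySem.List.enumerate t (0 + 1)).foldl (pvStepA true) (some x, some 0)).2,
            ((PySem.List.enumerate t (0 + 1)).foldl (pvStepA true) (some x, some 0)).1) = _
      rw [show ((0 : Int) + 1) = 1 from rfl, pvLoopMax t x 0 1]
      simp only [if_true, PySem.List.max?_id_cons]
      have hx : x ≤ t.foldl max x := (PySem.List.le_foldl_max t x).1
      by_cases hle : t.foldl max x ≤ x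
      · have hmx : t.foldl max x = x := le_antisymm hle hx
        rw [if_pos hle, hmx, PySem.List.index?_cons_self]
        simp
      · have hmem : t.foldl max x ∈ t := (PySem.List.foldl_max_mem t x).resolve_left (by omega)
        obtain ⟨j, hj⟩ := Option.isSome_iff_exists.mp
          ((PySem.List.index?_isSome_iff t (t.foldl max x)).mpr hmem)
        rw [if_neg hle, PySem.List.index?_cons_of_ne t (by omega : x ≠ t.foldl max x), hj]
        simp
        omega
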